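-- pv_equiv track=rewrite | github.com/ShawX825/CS4248 | data/data_analysis.py | get_pronoun_number
-- ===== SOURCE A (Python) =====
-- def get_pronoun_number(data):
--     total_number = 0
--     pronoun_number = 0
--     pronoun = ["me","i","he","him","her","she","we","us","them","they","it","you","mine","yours","theirs"]
--     for i in range(len(data)):
--         dialogue = data[i][0]
--         labels = data[i][1]
--         for j in range(len(dialogue)):
--             cur_sentence = dialogue[j].split(" ")
--             for token in cur_sentence:
--                 if token.lower() in pronoun:
--                     pronoun_number += 1
--                 total_number += 1
--     return pronoun_number, total_number
-- ===== SOURCE B (Python) =====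
-- PRONOUN = ["me","i","he","him","her","she","we","us","them","they","it","you",
--            "mine","yours","theirs"]
--
-- def get_pronoun_number(data):
--     # Build one frequency table of all lowercased tokens, then derive both
--     # counts from the table instead of branching per token.
--     freq = {}
--     for dialogue, labels in data:
--         for sentence in dialogue:
--             for token in sentence.split(" "):
--                 t = token.lower()
--                 freq[t] = freq.get(t, 0) + 1
--     total_number = sum(freq.values())
--     pronoun_number = sum(freq.get(p, 0) for p in PRONOUN)
--     return pronoun_number, total_number
-- ===== Notes on version B (the rewrite author's own statement) =====
-- stated objective: alternative
-- what changed: B builds one frequency table (dict) of all lowercased tokens in a single accumulation pass and then derives the totals by summing the table's values and looking up the 15 pronouns, instead of A's per-token membership test against the pronoun list inside the nested loops.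
import Mathlib
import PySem

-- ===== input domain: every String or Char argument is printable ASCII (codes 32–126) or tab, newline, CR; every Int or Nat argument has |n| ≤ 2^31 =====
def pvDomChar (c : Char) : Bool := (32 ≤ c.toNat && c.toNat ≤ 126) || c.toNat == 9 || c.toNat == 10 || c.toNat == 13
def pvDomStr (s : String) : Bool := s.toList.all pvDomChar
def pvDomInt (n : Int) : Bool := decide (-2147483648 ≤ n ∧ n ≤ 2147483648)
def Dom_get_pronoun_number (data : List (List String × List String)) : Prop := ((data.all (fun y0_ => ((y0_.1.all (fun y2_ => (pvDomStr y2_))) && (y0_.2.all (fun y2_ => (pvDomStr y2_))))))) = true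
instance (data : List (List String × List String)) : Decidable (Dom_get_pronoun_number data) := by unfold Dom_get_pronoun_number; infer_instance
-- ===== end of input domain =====

-- B builds one frequency table of all lowercased tokens and derives both counts by
-- summing table entries, instead of A's per-token membership branching (objective: alternative).

-- the pronoun list both Pythons carry
def pvPronoun : List String :=
  ["me","i","he","him","her","she","we","us","them","they","it","you","mine","yours","theirs"]

-- sentence.split(" ")  (sep ≠ "", so split? always returns some)
def pvToks (s : String) : List String := (PySem.Str.split? s " ").getD []

-- ===== PORT A =====
def get_pronoun_number (data : List (List String × List String)) : Int × Int :=
  let pronoun := pvPronoun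
  let r : Int × Int :=
    data.foldl (fun acc pair =>
      pair.1.foldl (fun acc sentence =>
        (pvToks sentence).foldl (fun acc token =>
          ((if pronoun.contains (PySem.Str.lower token) then acc.1 + 1 else acc.1),
           acc.2 + 1)) acc) acc) (0, 0)
  (r.1, r.2)

-- ===== PORT B =====
def get_pronoun_number_alt (data : List (List String × List String)) : Int × Int :=
  let freq : PySem.Dict String Int :=
    data.foldl (fun freq pair =>
      pair.1.foldl (fun freq sentence =>
        (pvToks sentence).foldl (fun freq token =>
          let t := PySem.Str.lower token
          freq.insert t (freq.getD t 0 + 1)) freq) freq) PySem.Dict.empty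
  let total_number := freq.values.sum
  let pronoun_number := (pvPronoun.map (fun p => freq.getD p 0)).sum
  (pronoun_number, total_number)

-- ===== PRECONDITION & SPEC =====
def Spec_get_pronoun_number (data : List (List String × List String)) (out : Int × Int) : Prop := out = get_pronoun_number_alt data
instance (data : List (List String × List String)) (out : Int × Int) : Decidable (Spec_get_pronoun_number data out) := by unfold Spec_get_pronoun_number; infer_instance

-- ===== CLAIM (what is proved, stated in full; the proofs are below) =====
def Claim_equal_get_pronoun_number : Prop := ∀ (data : List (List String × List String)), Dom_get_pronoun_number data → Spec_get_pronoun_number data (get_pronoun_number data)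

-- ===== LEMMAS AND PROOFS =====

-- the flat list of all lowercased tokens of all sentences of all dialogues
def pvAllToks (data : List (List String × List String)) : List String :=
  data.flatMap (fun pair => pair.1.flatMap (fun s => (pvToks s).map PySem.Str.lower))

-- folding over a flatMap is the nested fold
theorem pv_foldl_flatMap {α β σ : Type} (f : α → List β) (l : List α) (g : σ → β → σ) (a : σ) :
    (l.flatMap f).foldl g a = l.foldl (fun a x => (f x).foldl g a) a := by
  induction l generalizing a with
  | nil => rfl
  | cons x xs ih => simp [List.flatMap_cons, List.foldl_append, ih]

-- counting loop of a pair-accumulator fold over Int starting at a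
theorem pv_foldl_len (l : List String) (a : Int) :
    l.foldl (fun acc _ => acc + 1) a = a + l.length := by
  induction l generalizing a with
  | nil => simp
  | cons x xs ih => simp [List.foldl_cons, ih]; omega

-- over a Nodup list D, summing L.count over D counts the tokens of L lying in D
theorem pv_sum_counts (D : List String) (hD : D.Nodup) (L : List String) :
    (D.map (fun k => ((L.count k : Nat) : Int))).sum = ((L.countP (fun t => D.contains t) : Nat) : Int) := by
  induction L with
  | nil => simp
  | cons t L' ih =>
    have hsplit : (D.map (fun k => (((t :: L').count k : Nat) : Int))).sum
        = (D.map (fun k => ((L'.count k : Nat) : Int) + (if (fun k => k == t) k then 1 else 0))).sum := by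
      apply congrArg
      apply List.map_congr_left
      intro k _
      rw [List.count_cons]
      by_cases h : t = k
      · subst h; simp
      · have h1 : (t == k) = false := by simp [h]
        have h2 : (k == t) = false := by simp [Ne.symm h]
        simp [h1, h2]
    rw [hsplit, PySem.List.sum_map_add_int D (fun k => ((L'.count k : Nat) : Int)) _, ih,
        PySem.List.sum_map_ite_one_zero (fun k => k == t) D]
    have hcnt : D.countP (fun k => k == t) = if D.contains t then 1 else 0 := by
      show D.count t = _
      by_cases h : t ∈ D
      · simp [List.count_eq_one_of_mem hD h, h]
      · simp [List.count_eq_zero_of_not_mem h, h]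
    rw [List.countP_cons]
    rw [hcnt]
    by_cases h : t ∈ D
    · simp [h]
    · simp [h]

-- A computes (number of tokens in pvPronoun, number of tokens)
theorem pv_A_char (data : List (List String × List String)) :
    get_pronoun_number data
      = ((((pvAllToks data).countP (fun t => pvPronoun.contains t) : Nat) : Int),
         (((pvAllToks data).length : Nat) : Int)) := by
  unfold get_pronoun_number
  have h1 : ∀ (pair : List String × List String) (acc : Int × Int),
      pair.1.foldl (fun acc sentence =>
        (pvToks sentence).foldl (fun acc token =>
          ((if pvPronoun.contains (PySem.Str.lower token) then acc.1 + 1 else acc.1),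
           acc.2 + 1)) acc) acc
      = (pair.1.flatMap (fun s => (pvToks s).map PySem.Str.lower)).foldl
          (fun acc t => ((if pvPronoun.contains t then acc.1 + 1 else acc.1), acc.2 + 1)) acc := by
    intro pair acc
    rw [pv_foldl_flatMap]
    simp only [List.foldl_map]
  simp only [h1]
  rw [← pv_foldl_flatMap (fun pair => pair.1.flatMap (fun s => (pvToks s).map PySem.Str.lower))
        data (fun acc t => ((if pvPronoun.contains t then acc.1 + 1 else acc.1), acc.2 + 1)) (0, 0)]
  rw [PySem.List.foldl_prod_mk (fun (a : Int) t => if pvPronoun.contains t then a + 1 else a)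
        (fun (a : Int) _ => a + 1)]
  rw [PySem.List.foldl_if_add_one, pv_foldl_len]
  simp only [pvAllToks, zero_add]

-- B computes the same pair
theorem pv_B_char (data : List (List String × List String)) :
    get_pronoun_number_alt data
      = ((((pvAllToks data).countP (fun t => pvPronoun.contains t) : Nat) : Int),
         (((pvAllToks data).length : Nat) : Int)) := by
  unfold get_pronoun_number_alt
  have h1 : ∀ (pair : List String × List String) (freq : PySem.Dict String Int),
      pair.1.foldl (fun freq sentence =>
        (pvToks sentence).foldl (fun freq token =>
          let t := PySem.Str.lower token
          freq.insert t (freq.getD t 0 + 1)) freq) freq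
      = (pair.1.flatMap (fun s => (pvToks s).map PySem.Str.lower)).foldl
          (fun (d : PySem.Dict String Int) x => d.insert x (d.getD x 0 + 1)) freq := by
    intro pair freq
    rw [pv_foldl_flatMap]
    simp only [List.foldl_map]
  simp only [h1]
  rw [← pv_foldl_flatMap (fun pair => pair.1.flatMap (fun s => (pvToks s).map PySem.Str.lower))
        data (fun (d : PySem.Dict String Int) x => d.insert x (d.getD x 0 + 1)) PySem.Dict.empty]
  rw [PySem.Dict.foldl_insert_getD_add_one_eq_counter]
  have hfreq : ∀ p, (PySem.Dict.counter (pvAllToks data)).getD p 0 = ((pvAllToks data).count p : Int) :=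
    fun p => PySem.Dict.getD_counter (pvAllToks data) p
  refine Prod.ext ?_ ?_
  · show (pvPronoun.map (fun p => (PySem.Dict.counter (pvAllToks data)).getD p 0)).sum = _
    simp only [pvAllToks] at hfreq ⊢
    simp only [hfreq]
    exact pv_sum_counts pvPronoun (by decide) _
  · show (PySem.Dict.counter (pvAllToks data)).values.sum = _
    have hv : (PySem.Dict.counter (pvAllToks data)).values
        = (PySem.Set.ofList (pvAllToks data)).map
            (fun k => (((pvAllToks data).count k : Nat) : Int)) := by
      show (PySem.Dict.counter (pvAllToks data)).items.map (·.2) = _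
      rw [PySem.Dict.items_counter]
      simp [List.map_map, Function.comp]
    rw [hv, pv_sum_counts _ (PySem.Set.nodup_ofList _)]
    simp only [pvAllToks]
    congr 1
    rw [List.countP_eq_length]
    intro a ha
    have hm : a ∈ PySem.Set.ofList
        (data.flatMap (fun pair => pair.1.flatMap (fun s => (pvToks s).map PySem.Str.lower))) :=
      (PySem.Set.mem_ofList _ a).mpr ha
    simpa using hm

-- ===== VERDICT (by name: the statement is the Claim_ definition above) =====
theorem get_pronoun_number_spec : Claim_equal_get_pronoun_number := by
  intro data _
  unfold Spec_get_pronoun_number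
  rw [pv_A_char, pv_B_char]
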